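-- pv_equiv track=rewrite | github.com/aaah21/ciscoinfo | ciscoinfo/ciscoinfo.py | streamtolines
-- ===== SOURCE A (Python) =====
-- def streamtolines(stream):
--     lines = []
--     line = ''
--     for letter in stream:
--         if letter == 13:
--             next
--         if letter == 10:
--             if not ('show' in line or 'terminal length' in line):  # remove lines with commands from output.
--                 lines.append(line)
--             line = ''
--         else:
--             line = line + chr(letter)
--     return lines
-- ===== SOURCE B (Python) =====
-- def streamtolines(stream):
--     text = ''.join(chr(b) for b in stream)
--     lines = text.split('\n')[:-1]   # A never emits content after the last newline
--     return [l for l in lines if not ('show' in l or 'terminal length' in l)]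
-- ===== Notes on version B (the rewrite author's own statement) =====
-- stated objective: simpler
-- what changed: Replaces A's per-character accumulator state machine with a whole-text decomposition: join all chr(b) into one string, split on ' ', drop the unterminated tail, and filter out command lines with a comprehension.
-- outside the precondition, e.g. on streamtolines([-1]): A raises ValueError, B raises ValueError; on streamtolines([1114112, 10]): A raises ValueError, B raises ValueError; on streamtolines([55296]): A returns [], B returns []
import Mathlib
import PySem

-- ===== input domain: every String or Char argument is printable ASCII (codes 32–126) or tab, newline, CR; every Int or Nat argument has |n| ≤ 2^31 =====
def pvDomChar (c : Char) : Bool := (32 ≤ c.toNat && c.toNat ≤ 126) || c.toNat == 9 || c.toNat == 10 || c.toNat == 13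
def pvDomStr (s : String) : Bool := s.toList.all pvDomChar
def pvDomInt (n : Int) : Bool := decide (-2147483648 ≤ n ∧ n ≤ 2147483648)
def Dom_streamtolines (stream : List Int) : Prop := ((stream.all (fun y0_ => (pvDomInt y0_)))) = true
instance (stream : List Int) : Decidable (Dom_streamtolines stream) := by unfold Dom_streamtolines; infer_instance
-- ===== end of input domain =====

-- B replaces A's per-character accumulator state machine by join + split('\n')[:-1] + filter (simpler decomposition).


-- chr(n): exact for valid non-surrogate code points, which Pre_streamtolines guarantees
def pyChr (n : Int) : Char := Char.ofNat n.toNat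

-- the shared filter condition 'show' in line or 'terminal length' in line (identical text in both Pythons)
def pvIsCmd (line : List Char) : Bool :=
  PySem.Chars.isIn "show".toList line || PySem.Chars.isIn "terminal length".toList line

-- ===== PORT A =====
-- one fold step of A's loop; state = (lines, line).  'if letter == 13: next' is a no-op in Python and is omitted.
def pvStepA (acc : List String × List Char) (letter : Int) : List String × List Char :=
  if letter = 10 then
    (if pvIsCmd acc.2 then acc.1 else acc.1 ++ [String.ofList acc.2], [])
  else
    (acc.1, acc.2 ++ [pyChr letter])

def streamtolines (stream : List Int) : List String :=
  (stream.foldl pvStepA ([], [])).1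

-- ===== PORT B =====
def streamtolines_alt (stream : List Int) : List String :=
  let text : List Char := stream.map pyChr                  -- ''.join(chr(b) for b in stream)
  let lines : List (List Char) := (List.splitOn '\n' text).dropLast   -- text.split('\n')[:-1]
  (lines.filter (fun l => !pvIsCmd l)).map String.ofList

-- ===== PRECONDITION & SPEC =====
-- Pre_ excludes code points on which chr raises ValueError (negative or ≥ 0x110000) and surrogate code
-- points 0xD800–0xDFFF, on which A returns strings containing lone surrogates not representable in the target String type.
def Pre_streamtolines (stream : List Int) : Prop :=
  ∀ b ∈ stream, 0 ≤ b ∧ b < 1114112 ∧ ¬(55296 ≤ b ∧ b < 57344)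
instance (stream : List Int) : Decidable (Pre_streamtolines stream) := by
  unfold Pre_streamtolines; infer_instance
def pvWitness_streamtolines : List Int := [115, 104, 111, 13, 10, 111, 107, 10]

def Spec_streamtolines (stream : List Int) (out : List String) : Prop := out = streamtolines_alt stream
instance (stream : List Int) (out : List String) : Decidable (Spec_streamtolines stream out) := by unfold Spec_streamtolines; infer_instance

-- ===== CLAIM (what is proved, stated in full; the proofs are below) =====
def Claim_equal_streamtolines : Prop := ∀ (stream : List Int), Dom_streamtolines stream → Pre_streamtolines stream → Spec_streamtolines stream (streamtolines stream)

-- ===== LEMMAS AND PROOFS =====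

theorem splitOn_ne_nil (sep : Char) (xs : List Char) : List.splitOn sep xs ≠ [] := by
  induction xs with
  | nil => simp [List.splitOn]
  | cons a t ih =>
    simp only [List.splitOn, List.splitOnP_cons] at *
    split_ifs
    · simp
    · cases h : List.splitOnP (· == sep) t <;> simp_all [List.modifyHead]

theorem splitOn_no_sep (sep : Char) (xs : List Char) (h : sep ∉ xs) :
    List.splitOn sep xs = [xs] := by
  induction xs with
  | nil => simp [List.splitOn]
  | cons a t ih =>
    simp only [List.mem_cons, not_or] at h
    simp only [List.splitOn, List.splitOnP_cons] at *
    rw [if_neg (by simpa using Ne.symm h.1)]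
    rw [ih h.2]
    rfl

theorem splitOn_append_sep (sep : Char) (l rest : List Char) (h : sep ∉ l) :
    List.splitOn sep (l ++ sep :: rest) = l :: List.splitOn sep rest := by
  induction l with
  | nil => simp [List.splitOn, List.splitOnP_cons]
  | cons a t ih =>
    simp only [List.mem_cons, not_or] at h
    simp only [List.cons_append, List.splitOn, List.splitOnP_cons] at *
    rw [if_neg (by simpa using Ne.symm h.1)]
    rw [ih h.2]
    rfl

-- the invariant of A's loop, related to B's split of the remaining text
theorem loopA_eq (stream : List Int) (hpre : Pre_streamtolines stream)
    (lines : List String) (line : List Char) (hline : '\n' ∉ line) :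
    (stream.foldl pvStepA (lines, line)).1 =
      lines ++ (((List.splitOn '\n' (line ++ stream.map pyChr)).dropLast.filter
        (fun l => !pvIsCmd l)).map String.ofList) := by
  induction stream generalizing lines line with
  | nil =>
    simp [splitOn_no_sep '\n' line hline]
  | cons b s ih =>
    have hb := hpre b (by simp)
    have hs : Pre_streamtolines s := fun x hx => hpre x (by simp [hx])
    by_cases h10 : b = 10
    · subst h10
      have hchr : pyChr 10 = '\n' := by decide
      simp only [List.foldl_cons, pvStepA, List.map_cons, hchr, if_true]
      rw [splitOn_append_sep '\n' line (s.map pyChr) hline]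
      have hne := splitOn_ne_nil '\n' (s.map pyChr)
      rw [List.dropLast_cons_of_ne_nil hne]
      by_cases hc : pvIsCmd line
      · rw [if_pos hc, ih hs _ [] (by simp)]
        simp [hc]
      · rw [if_neg hc, ih hs _ [] (by simp)]
        simp [hc]
    · have hchr : pyChr b ≠ '\n' := by
        intro hcontra
        obtain ⟨hb1, hb2, hb3⟩ := hb
        have hv : b.toNat.isValidChar := by unfold Nat.isValidChar; omega
        have ht : (Char.ofNat b.toNat).toNat = b.toNat := by
          rw [Char.ofNat, dif_pos hv]; simp [Char.ofNatAux, Char.toNat]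
        rw [show Char.ofNat b.toNat = '\n' from hcontra] at ht
        have h10' : ('\n').toNat = 10 := rfl
        omega
      simp only [List.foldl_cons, pvStepA, if_neg h10]
      rw [ih hs _ (line ++ [pyChr b]) (by simp [hline, Ne.symm hchr])]
      simp

-- ===== VERDICT (by name: the statement is the Claim_ definition above) =====
theorem streamtolines_spec : Claim_equal_streamtolines := by
  intro stream _ hpre
  unfold Spec_streamtolines streamtolines streamtolines_alt
  simpa using loopA_eq stream hpre [] [] (by simp)
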